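-- pv_equiv track=rewrite | github.com/1310097824-sys/Mahjong | app/engine.py | hand_has_sanrenkou
-- ===== SOURCE A (Python) =====
-- def hand_has_sanrenkou(hand: list[list[int]]) -> bool:
--     triplet_heads = sorted(
--         {
--             group[0]
--             for group in hand
--             if len(group) >= 3 and group[0] == group[1] == group[2] and group[0] < 27
--         }
--     )
--     return any(
--         triplet_heads[index : index + 3] == [triplet_heads[index], triplet_heads[index] + 1, triplet_heads[index] + 2]
--         for index in range(max(0, len(triplet_heads) - 2))
--     )
-- ===== SOURCE B (Python) =====
-- def hand_has_sanrenkou(hand: list[list[int]]) -> bool: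
--     heads = set()
--     for group in hand:
--         if len(group) >= 3 and group[0] == group[1] == group[2] and group[0] < 27:
--             heads.add(group[0])
--     return any(h + 1 in heads and h + 2 in heads for h in heads)
-- ===== Notes on version B (the rewrite author's own statement) =====
-- stated objective: simpler
-- what changed: B collects triplet heads in a set and detects three consecutive heads by probing h+1 and h+2 for membership, removing A's sort and positional sliding-window slice comparison entirely.
import Mathlib
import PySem

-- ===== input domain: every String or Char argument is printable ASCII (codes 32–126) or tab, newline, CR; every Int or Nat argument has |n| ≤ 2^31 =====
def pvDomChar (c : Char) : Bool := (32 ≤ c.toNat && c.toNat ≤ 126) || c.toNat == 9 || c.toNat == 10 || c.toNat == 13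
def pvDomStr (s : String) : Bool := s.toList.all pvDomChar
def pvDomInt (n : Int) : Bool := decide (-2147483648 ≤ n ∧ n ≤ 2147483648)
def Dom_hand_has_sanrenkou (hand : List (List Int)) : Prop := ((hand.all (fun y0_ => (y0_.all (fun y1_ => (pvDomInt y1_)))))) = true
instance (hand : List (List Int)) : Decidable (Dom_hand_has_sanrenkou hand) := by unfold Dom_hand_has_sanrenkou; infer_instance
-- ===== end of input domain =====

-- B replaces A's sort + sliding-window slice comparison by a set of triplet heads probed for h+1 and h+2 (simpler, no sort).



-- ===== PORT A =====
-- A's triplet-head condition: len(group) >= 3 and group[0] == group[1] == group[2] and group[0] < 27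
def tripletCondA (g : List Int) : Bool :=
  decide (3 ≤ g.length) && (PySem.List.pyGetD g 0 0 == PySem.List.pyGetD g 1 0)
    && (PySem.List.pyGetD g 1 0 == PySem.List.pyGetD g 2 0)
    && decide (PySem.List.pyGetD g 0 0 < 27)

def hand_has_sanrenkou (hand : List (List Int)) : Bool :=
  let triplet_heads : List Int :=
    PySem.List.sorted
      (PySem.Set.ofList ((hand.filter tripletCondA).map (fun g => PySem.List.pyGetD g 0 0)))
      (fun x => x) false
  (PySem.List.pyRange 0 (max 0 ((triplet_heads.length : Int) - 2)) 1).any (fun index =>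
    PySem.List.slice triplet_heads (some index) (some (index + 3)) ==
      [PySem.List.pyGetD triplet_heads index 0, PySem.List.pyGetD triplet_heads index 0 + 1,
       PySem.List.pyGetD triplet_heads index 0 + 2])

-- ===== PORT B =====  (B: one pass building a set of heads, then membership probes; no sort, no slices)
def hand_has_sanrenkou_alt (hand : List (List Int)) : Bool :=
  let heads : PySem.Set Int := hand.foldl (fun s g =>
    if decide (3 ≤ g.length) && (PySem.List.pyGetD g 0 0 == PySem.List.pyGetD g 1 0)
        && (PySem.List.pyGetD g 1 0 == PySem.List.pyGetD g 2 0)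
        && decide (PySem.List.pyGetD g 0 0 < 27)
    then PySem.Set.add s (PySem.List.pyGetD g 0 0) else s) PySem.Set.empty
  heads.any (fun h => PySem.Set.contains heads (h + 1) && PySem.Set.contains heads (h + 2))

-- ===== PRECONDITION & SPEC =====
def Spec_hand_has_sanrenkou (hand : List (List Int)) (out : Bool) : Prop := out = hand_has_sanrenkou_alt hand
instance (hand : List (List Int)) (out : Bool) : Decidable (Spec_hand_has_sanrenkou hand out) := by unfold Spec_hand_has_sanrenkou; infer_instance

-- ===== CLAIM (what is proved, stated in full; the proofs are below) =====
def Claim_equal_hand_has_sanrenkou : Prop := ∀ (hand : List (List Int)), Dom_hand_has_sanrenkou hand → Spec_hand_has_sanrenkou hand (hand_has_sanrenkou hand)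

-- ===== LEMMAS AND PROOFS =====

-- B's fold builds exactly set(<heads of the groups passing A's filter>)
theorem foldl_add_filter (hand : List (List Int)) (s : PySem.Set Int) :
    hand.foldl (fun s g =>
      if decide (3 ≤ g.length) && (PySem.List.pyGetD g 0 0 == PySem.List.pyGetD g 1 0)
          && (PySem.List.pyGetD g 1 0 == PySem.List.pyGetD g 2 0)
          && decide (PySem.List.pyGetD g 0 0 < 27)
      then PySem.Set.add s (PySem.List.pyGetD g 0 0) else s) s
    = ((hand.filter tripletCondA).map (fun g => PySem.List.pyGetD g 0 0)).foldl PySem.Set.add s := by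
  show hand.foldl (fun s g => if tripletCondA g then PySem.Set.add s (PySem.List.pyGetD g 0 0) else s) s = _
  induction hand generalizing s with
  | nil => rfl
  | cons g t ih =>
    simp only [List.foldl_cons, List.filter_cons]
    by_cases h : tripletCondA g
    · rw [if_pos h, if_pos h, List.map_cons, List.foldl_cons, ih]
    · rw [if_neg h, if_neg h, ih]

-- on a strictly increasing integer list, a window [x, x+1, x+2] at consecutive positions
-- exists iff some h with h+1 and h+2 are all members
theorem consecutive_iff_mem (l : List Int) (hp : l.Pairwise (· < ·)) :
    (∃ (k : Nat) (h : k + 2 < l.length),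
        l[k + 1]'(by omega) = l[k]'(by omega) + 1 ∧ l[k + 2]'h = l[k]'(by omega) + 2) ↔
    (∃ h ∈ l, h + 1 ∈ l ∧ h + 2 ∈ l) := by
  rw [List.pairwise_iff_getElem] at hp
  constructor
  · rintro ⟨k, hk, h1, h2⟩
    exact ⟨l[k]'(by omega), List.getElem_mem _, by rw [← h1]; exact List.getElem_mem _,
      by rw [← h2]; exact List.getElem_mem _⟩
  · rintro ⟨h, hh, hh1, hh2⟩
    obtain ⟨i, hi, hie⟩ := List.mem_iff_getElem.mp hh
    obtain ⟨j, hj, hje⟩ := List.mem_iff_getElem.mp hh1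
    obtain ⟨m, hm, hme⟩ := List.mem_iff_getElem.mp hh2
    have hij : i < j := by
      by_contra hc
      rcases Nat.lt_or_ge j i with hji | hge
      · have := hp j i hj hi hji; omega
      · have : j = i := by omega
        subst this; omega
    have hj1 : j = i + 1 := by
      by_contra hc
      have hlt : i + 1 < j := by omega
      have h1 : l[i]'hi < l[i+1]'(by omega) := hp i (i+1) hi (by omega) (by omega)
      have h2 : l[i+1]'(by omega) < l[j]'hj := hp (i+1) j (by omega) hj hlt
      omega
    have hjm : j < m := by
      by_contra hc
      rcases Nat.lt_or_ge m j with hmj | hge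
      · have := hp m j hm hj hmj; omega
      · have : m = j := by omega
        subst this; omega
    have hm1 : m = j + 1 := by
      by_contra hc
      have hlt : j + 1 < m := by omega
      have h1 : l[j]'hj < l[j+1]'(by omega) := hp j (j+1) hj (by omega) (by omega)
      have h2 : l[j+1]'(by omega) < l[m]'hm := hp (j+1) m (by omega) hm hlt
      omega
    subst hj1; subst hm1
    have hme' : l[i + 2]'(by omega) = h + 2 := hme
    exact ⟨i, by omega, by omega, by omega⟩

-- A's slice test at a valid natural index is the two pointwise equalities
theorem pred_eq (l : List Int) (k : Nat) (hk : k + 2 < l.length) :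
    ((PySem.List.slice l (some (k : Int)) (some ((k : Int) + 3)) ==
      [PySem.List.pyGetD l (k : Int) 0, PySem.List.pyGetD l (k : Int) 0 + 1,
       PySem.List.pyGetD l (k : Int) 0 + 2]) = true) ↔
    (l[k + 1]'(by omega) = l[k]'(by omega) + 1 ∧ l[k + 2]'hk = l[k]'(by omega) + 2) := by
  have hc : ((k : Int) + 3) = ((k + 3 : Nat) : Int) := by push_cast; ring
  rw [hc, PySem.List.slice_natCast, PySem.List.pyGetD_natCast]
  have ht : k + 3 - k = 3 := by omega
  have hd : List.take 3 (List.drop k l)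
      = [l[k]'(by omega), l[k + 1]'(by omega), l[k + 2]'hk] := by
    rw [List.drop_eq_getElem_cons (show k < l.length by omega),
        List.drop_eq_getElem_cons (show k + 1 < l.length by omega),
        List.drop_eq_getElem_cons (show k + 2 < l.length by omega)]
    rfl
  rw [ht, hd, List.getD_eq_getElem l 0 (show k < l.length by omega)]
  simp

-- ===== VERDICT (by name: the statement is the Claim_ definition above) =====
theorem hand_has_sanrenkou_spec : Claim_equal_hand_has_sanrenkou := by
  intro hand _
  unfold Spec_hand_has_sanrenkou hand_has_sanrenkou hand_has_sanrenkou_alt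
  rw [foldl_add_filter]
  set L : PySem.Set Int :=
    PySem.Set.ofList ((hand.filter tripletCondA).map (fun g => PySem.List.pyGetD g 0 0)) with hL
  set l : List Int := PySem.List.sorted L (fun x => x) false with hl
  have hml : ∀ x : Int, x ∈ l ↔ x ∈ L := fun x => PySem.List.mem_sorted L _ false x
  have hp : l.Pairwise (· < ·) := by rw [hl, hL]; exact PySem.List.sorted_ofList_pairwise_lt _
  rw [Bool.eq_iff_iff]
  rw [List.any_eq_true, List.any_eq_true]
  constructor
  · rintro ⟨index, hmem, hpred⟩
    rw [PySem.List.mem_pyRange_one] at hmem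
    obtain ⟨h0, hlt⟩ := hmem
    have hk2 : index.toNat + 2 < l.length := by omega
    have hidx : index = ((index.toNat : Nat) : Int) := by omega
    rw [hidx] at hpred
    have := (pred_eq l index.toNat hk2).mp hpred
    have hcons := (consecutive_iff_mem l hp).mp ⟨index.toNat, hk2, this⟩
    obtain ⟨h, hh, hh1, hh2⟩ := hcons
    refine ⟨h, (hml h).mp hh, ?_⟩
    simp only [PySem.Set.contains, Bool.and_eq_true, List.contains_iff_mem]
    exact ⟨(hml _).mp hh1, (hml _).mp hh2⟩
  · rintro ⟨h, hh, hpr⟩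
    simp only [PySem.Set.contains, Bool.and_eq_true, List.contains_iff_mem] at hpr
    have hcons := (consecutive_iff_mem l hp).mpr
      ⟨h, (hml h).mpr hh, (hml _).mpr hpr.1, (hml _).mpr hpr.2⟩
    obtain ⟨k, hk, heq⟩ := hcons
    refine ⟨(k : Int), ?_, (pred_eq l k hk).mpr heq⟩
    rw [PySem.List.mem_pyRange_one]
    omega
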